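-- pv_equiv track=rewrite | github.com/TessFerrandez/AdventOfCode-Python | 2021/day9.py | calculate_largest_basins
-- ===== SOURCE A (Python) =====
-- from collections import Counter
--
-- def merge(regions: dict, region1: int, region2: int):
--     for region in regions:
--         if regions[region] == region1:
--             regions[region] = region2
--
-- def calculate_largest_basins(heights) -> int:
--     regions = {location: region_number for region_number, location in enumerate(heights) if heights[location] != 9}
--     for x, y in regions:
--         if (x - 1, y) in regions:
--             merge(regions, regions[(x - 1, y)], regions[(x, y)])
--         if (x, y - 1) in regions:
--             merge(regions, regions[(x, y - 1)], regions[(x, y)])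
--
--     basin_sizes = [size[1] for size in Counter(regions.values()).most_common(3)]
--     return basin_sizes[0] * basin_sizes[1] * basin_sizes[2]
-- ===== SOURCE B (Python) =====
-- def calculate_largest_basins(heights) -> int:
--     label = {}
--     members = {}
--     for cell in heights:
--         if heights[cell] != 9:
--             label[cell] = cell
--             members[cell] = [cell]
--     for (x, y) in label:
--         for nb in ((x - 1, y), (x, y - 1)):
--             if nb in label:
--                 a = label[nb]
--                 b = label[(x, y)]
--                 if a != b:
--                     if len(members[a]) > len(members[b]):
--                         a, b = b, a
--                     for c in members[a]:
--                         label[c] = b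
--                     members[b] = members[b] + members[a]
--                     del members[a]
--     sizes = sorted((len(m) for m in members.values()), reverse=True)
--     return sizes[0] * sizes[1] * sizes[2]
-- ===== Notes on version B (the rewrite author's own statement) =====
-- stated objective: faster
-- what changed: A unions two basins by scanning and relabelling the WHOLE regions dict for every adjacent pair (and rebuilds sizes with a Counter at the end); B keeps an explicit members index per representative and does weighted quick-find: each union relabels only the cells of the smaller class and concatenates the two member lists, so sizes are read off directly and sorted.
import Mathlib
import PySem

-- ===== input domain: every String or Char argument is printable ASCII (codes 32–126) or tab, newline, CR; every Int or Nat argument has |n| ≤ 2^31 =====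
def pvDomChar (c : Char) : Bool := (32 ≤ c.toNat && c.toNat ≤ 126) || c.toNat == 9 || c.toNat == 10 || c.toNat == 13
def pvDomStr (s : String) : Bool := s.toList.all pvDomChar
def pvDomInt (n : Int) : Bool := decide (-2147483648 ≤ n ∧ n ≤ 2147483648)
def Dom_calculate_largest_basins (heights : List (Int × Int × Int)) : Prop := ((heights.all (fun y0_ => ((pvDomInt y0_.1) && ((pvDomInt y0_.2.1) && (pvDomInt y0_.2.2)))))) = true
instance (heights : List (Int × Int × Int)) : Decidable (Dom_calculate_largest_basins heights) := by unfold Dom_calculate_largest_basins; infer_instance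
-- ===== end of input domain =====

-- B replaces A's merge-by-scanning-the-whole-dict with weighted quick-find (relabel only the
-- smaller class via a members index) and reads the basin sizes off that index; same return value.

-- input marshalling: the Python argument is a dict {(x,y): h}; dict(pairs) semantics
def pvHeightsDict (heights : List (Int × Int × Int)) : PySem.Dict (Int × Int) Int :=
  PySem.Dict.ofList (heights.map (fun t => ((t.1, t.2.1), t.2.2)))

-- ===== PORT A =====
-- merge(regions, region1, region2): for region in regions: if regions[region]==region1: regions[region]=region2
def pvMerge (regions : PySem.Dict (Int × Int) Int) (region1 region2 : Int) :
    PySem.Dict (Int × Int) Int :=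
  regions.keys.foldl
    (fun d region => if d.getD region 0 = region1 then d.insert region region2 else d) regions

def calculate_largest_basins (heights : List (Int × Int × Int)) : Int :=
  let hd := pvHeightsDict heights
  -- {location: region_number for region_number, location in enumerate(heights) if heights[location] != 9}
  let regions0 := (PySem.List.enumerate hd.keys).foldl
      (fun d p => if hd.getD p.2 0 ≠ 9 then d.insert p.2 p.1 else d) PySem.Dict.empty
  -- for x, y in regions: two conditional merges
  let regions := regions0.keys.foldl (fun d c =>
      let d1 := if d.contains (c.1 - 1, c.2) then pvMerge d (d.getD (c.1 - 1, c.2) 0) (d.getD c 0) else d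
      if d1.contains (c.1, c.2 - 1) then pvMerge d1 (d1.getD (c.1, c.2 - 1) 0) (d1.getD c 0) else d1)
      regions0
  -- Counter(regions.values()).most_common(3) = sorted(items, key=snd, reverse=True)[:3]
  let basin_sizes := (PySem.List.slice
      (PySem.List.sorted (PySem.Dict.counter regions.values).items (fun p => p.2) true)
      none (some 3)).map (fun p => p.2)
  -- basin_sizes[0]*basin_sizes[1]*basin_sizes[2]; .getD 0 is a totality guard only:
  -- Pre_ excludes the inputs (< 3 basins) where Python raises IndexError here
  ((PySem.List.pyGet? basin_sizes 0).getD 0) * ((PySem.List.pyGet? basin_sizes 1).getD 0) *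
    ((PySem.List.pyGet? basin_sizes 2).getD 0)

-- ===== PORT B =====
-- body of "if nb in label:" — weighted union: relabel only the smaller class, merge member lists
def pvUnion (s : PySem.Dict (Int × Int) (Int × Int) × PySem.Dict (Int × Int) (List (Int × Int)))
    (c nb : Int × Int) :
    PySem.Dict (Int × Int) (Int × Int) × PySem.Dict (Int × Int) (List (Int × Int)) :=
  if s.1.contains nb then
    let a := s.1.getD nb nb
    let b := s.1.getD c c
    if a ≠ b then
      let ab := if (s.2.getD a []).length > (s.2.getD b []).length then (b, a) else (a, b)
      ((s.2.getD ab.1 []).foldl (fun l cc => l.insert cc ab.2) s.1,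
       (s.2.insert ab.2 (s.2.getD ab.2 [] ++ s.2.getD ab.1 [])).erase ab.1)
    else s
  else s

def calculate_largest_basins_alt (heights : List (Int × Int × Int)) : Int :=
  let hd := pvHeightsDict heights
  -- one loop initialising label (cell -> representative cell) and members (representative -> cells)
  let init := hd.keys.foldl
      (fun (s : PySem.Dict (Int × Int) (Int × Int) × PySem.Dict (Int × Int) (List (Int × Int))) cell =>
        if hd.getD cell 0 ≠ 9 then (s.1.insert cell cell, s.2.insert cell [cell]) else s)
      (PySem.Dict.empty, PySem.Dict.empty)
  let st := init.1.keys.foldl (fun s c =>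
      [(c.1 - 1, c.2), (c.1, c.2 - 1)].foldl (fun s nb => pvUnion s c nb) s) init
  -- sizes = sorted((len(m) for m in members.values()), reverse=True)
  let sizes := PySem.List.sorted (st.2.values.map (fun m => (m.length : Int))) (fun x => x) true
  -- sizes[0]*sizes[1]*sizes[2]; .getD 0 is a totality guard, outside Pre_ only
  ((PySem.List.pyGet? sizes 0).getD 0) * ((PySem.List.pyGet? sizes 1).getD 0) *
    ((PySem.List.pyGet? sizes 2).getD 0)

-- ===== PRECONDITION & SPEC =====
-- helpers for Pre_: number of 4-connected components of the non-9 cells, computed by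
-- incremental group merging (independent of both ports' algorithms)
def pvAdj (c e : Int × Int) : Bool :=
  (c.1 == e.1 && (c.2 == e.2 + 1 || e.2 == c.2 + 1)) ||
  (c.2 == e.2 && (c.1 == e.1 + 1 || e.1 == c.1 + 1))

def pvGroups (cells : List (Int × Int)) : List (List (Int × Int)) :=
  cells.foldl (fun gs c =>
    let p := gs.partition (fun g => g.any (fun e => pvAdj c e))
    (c :: p.1.flatten) :: p.2) []

-- Pre_ = the puzzle's own premise: at least three basins; on fewer, Python A (and B alike)
-- raises IndexError indexing the third largest size, so no value is claimed there.
def Pre_calculate_largest_basins (heights : List (Int × Int × Int)) : Prop :=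
  3 ≤ (pvGroups (((pvHeightsDict heights).items.filter (fun p => !(p.2 == 9))).map (fun p => p.1))).length
instance (heights : List (Int × Int × Int)) : Decidable (Pre_calculate_largest_basins heights) := by
  unfold Pre_calculate_largest_basins; infer_instance

def pvWitness_calculate_largest_basins : (List (Int × Int × Int)) :=
  [(0, 0, 1), (2, 0, 1), (4, 0, 1)]

def Spec_calculate_largest_basins (heights : List (Int × Int × Int)) (out : Int) : Prop :=
  out = calculate_largest_basins_alt heights
instance (heights : List (Int × Int × Int)) (out : Int) :
    Decidable (Spec_calculate_largest_basins heights out) := by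
  unfold Spec_calculate_largest_basins; infer_instance

-- ===== CLAIM (what is proved, stated in full; the proofs are below) =====
def Claim_equal_calculate_largest_basins : Prop :=
  ∀ (heights : List (Int × Int × Int)), Dom_calculate_largest_basins heights →
    Pre_calculate_largest_basins heights →
    Spec_calculate_largest_basins heights (calculate_largest_basins heights)

-- ===== LEMMAS AND PROOFS =====


theorem pvFind?_proj {a b : Type} [BEq b] [LawfulBEq b] (g : a → b) :
    ∀ (l : List a) (x : a), (l.map g).Nodup → x ∈ l →
      l.find? (fun y => g y == g x) = some x := by
  intro l
  induction l with
  | nil => intro x _ hx; simp at hx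
  | cons h t ih =>
    intro x hnd hx
    simp only [List.map_cons, List.nodup_cons] at hnd
    rcases List.mem_cons.mp hx with rfl | hxt
    · simp [List.find?_cons]
    · have hgne : (g h == g x) = false := by
        simp only [beq_eq_false_iff_ne, ne_eq]
        intro he
        exact hnd.1 (he ▸ List.mem_map_of_mem hxt)
      simp only [List.find?_cons, hgne]
      exact ih x hnd.2 hxt

theorem pvFilter_singleton {a : Type} (p : a → Bool) :
    ∀ (l : List a) (c : a), l.Nodup → c ∈ l → (∀ x ∈ l, (p x = true ↔ x = c)) →
      l.filter p = [c] := by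
  intro l
  induction l with
  | nil => intro c _ hc; simp at hc
  | cons h t ih =>
    intro c hnd hc hp
    simp only [List.nodup_cons] at hnd
    rcases List.mem_cons.mp hc with rfl | hct
    · have hpc : p c = true := (hp c (by simp)).mpr rfl
      have : t.filter p = [] := by
        rw [List.filter_eq_nil_iff]
        intro x hx hpx
        exact hnd.1 (((hp x (by simp [hx])).mp hpx) ▸ hx)
      simp [List.filter_cons, hpc, this]
    · have hph : p h = false := by
        rcases Bool.eq_false_or_eq_true (p h) with h' | h'
        · exact absurd ((hp h (by simp)).mp h' ▸ hct) hnd.1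
        · exact h'
      simp only [List.filter_cons, hph, if_neg]
      · exact ih c hnd.2 hct (fun x hx => hp x (by simp [hx]))

theorem pvFilter_or_perm {a : Type} (p q : a → Bool) :
    ∀ (l : List a), (∀ x ∈ l, ¬(p x = true ∧ q x = true)) →
      (l.filter (fun x => p x || q x)).Perm (l.filter p ++ l.filter q) := by
  intro l
  induction l with
  | nil => intro _; simp
  | cons h t ih =>
    intro hd
    have iht := ih (fun x hx => hd x (by simp [hx]))
    rcases hp : p h with _ | _ <;> rcases hq : q h with _ | _
    · simpa [List.filter_cons, hp, hq] using iht
    · simp only [List.filter_cons, hp, hq, Bool.false_or, if_pos, if_neg, Bool.false_eq_true,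
        ite_false, ite_true]
      exact ((iht.cons h).trans List.perm_middle.symm)
    · simpa [List.filter_cons, hp, hq] using iht.cons h
    · exact absurd ⟨hp, hq⟩ (hd h (by simp))

theorem pvFind?_filter {a : Type} (p q : a → Bool) (him : ∀ x, p x = true → q x = true) :
    ∀ (l : List a), (l.filter q).find? p = l.find? p := by
  intro l
  induction l with
  | nil => simp
  | cons h t ih =>
    rcases hq : q h with _ | _
    · have hp : p h = false := by
        rcases Bool.eq_false_or_eq_true (p h) with h' | h'
        · rw [him h h'] at hq; exact absurd hq (by simp)
        · exact h'
      simp [List.filter_cons, hq, List.find?_cons, hp, ih]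
    · rcases hp : p h with _ | _
      · simp [List.filter_cons, hq, List.find?_cons, hp, ih]
      · simp [List.filter_cons, hq, List.find?_cons, hp]

theorem pvFoldlIte {a b : Type} (P : a → Prop) [DecidablePred P] (f : b → a → b) :
    ∀ (l : List a) (init : b),
      l.foldl (fun s x => if P x then f s x else s) init
        = (l.filter (fun x => decide (P x))).foldl f init := by
  intro l
  induction l with
  | nil => intro init; simp
  | cons h t ih =>
    intro init
    by_cases hP : P h
    · simp [List.filter_cons, hP, ih]
    · simp [List.filter_cons, hP, ih]

theorem pvEnumFilterMap {a : Type} (P : a → Bool) :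
    ∀ (l : List a) (s : Int),
      (((PySem.List.enumerate l s).filter (fun p => P p.2)).map (fun p => p.2)) = l.filter P := by
  intro l
  induction l with
  | nil => intro s; simp [PySem.List.enumerate]
  | cons h t ih =>
    intro s
    rw [PySem.List.enumerate_cons]
    rcases hP : P h with _ | _
    · simp [List.filter_cons, hP, ih]
    · simp [List.filter_cons, hP, ih]

theorem pvKeys_erase {k v : Type} [BEq k] (d : PySem.Dict k v) (x : k) :
    (d.erase x).keys = d.keys.filter (fun y => !(y == x)) := by
  show (d.items.filter (fun p => !(p.1 == x))).map (fun p => p.1)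
      = (d.items.map (fun p => p.1)).filter (fun y => !(y == x))
  induction d.items with
  | nil => rfl
  | cons h t ih =>
    rcases hb : (h.1 == x) with _ | _ <;>
      simp [List.filter_cons, hb, ih]

theorem pvGetD_erase_of_ne {k v : Type} [BEq k] [LawfulBEq k] (d : PySem.Dict k v) (x y : k)
    (dflt : v) (h : (y == x) = false) : (d.erase x).getD y dflt = d.getD y dflt := by
  simp only [PySem.Dict.getD, PySem.Dict.get?, PySem.Dict.erase]
  rw [pvFind?_filter (a := k × v) (fun p => p.1 == y) (fun p => !(p.1 == x))]
  intro p hp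
  simp only [beq_iff_eq] at hp
  simp only [Bool.not_eq_true', beq_eq_false_iff_ne, ne_eq, hp]
  intro he
  simp [he] at h

theorem pvRelabel_char {k v : Type} [BEq k] [LawfulBEq k] [DecidableEq k] (b : v) :
    ∀ (cells : List k) (lab : PySem.Dict k v), (∀ x ∈ cells, x ∈ lab.keys) →
      (cells.foldl (fun l cc => l.insert cc b) lab).keys = lab.keys ∧
      ∀ (x : k) (dflt : v),
        (cells.foldl (fun l cc => l.insert cc b) lab).getD x dflt
          = if x ∈ cells then b else lab.getD x dflt := by
  intro cells
  induction cells with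
  | nil => intro lab _; simp
  | cons c t ih =>
    intro lab hsub
    have hck : lab.contains c = true :=
      (PySem.Dict.contains_iff_mem_keys lab c).mpr (hsub c (by simp))
    have hkeys1 : (lab.insert c b).keys = lab.keys :=
      PySem.Dict.keys_insert_of_contains lab b hck
    have hsub1 : ∀ x ∈ t, x ∈ (lab.insert c b).keys := by
      intro x hx; rw [hkeys1]; exact hsub x (by simp [hx])
    obtain ⟨ihk, ihg⟩ := ih (lab.insert c b) hsub1
    constructor
    · simpa [hkeys1] using ihk
    · intro x dflt
      simp only [List.foldl_cons]
      rw [ihg x dflt]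
      by_cases hxt : x ∈ t
      · simp [hxt]
      · by_cases hxc : x = c
        · subst hxc
          simp [hxt, PySem.Dict.getD_insert]
        · simp [hxt, hxc, PySem.Dict.getD_insert]

theorem pvMergeFold_char (r1 r2 : Int) :
    ∀ (ks : List (Int × Int)) (d : PySem.Dict (Int × Int) Int), ks.Nodup →
      (∀ x ∈ ks, x ∈ d.keys) →
      (ks.foldl (fun d region => if d.getD region 0 = r1 then d.insert region r2 else d) d).keys
          = d.keys ∧
      ∀ x : Int × Int,
        (ks.foldl (fun d region => if d.getD region 0 = r1 then d.insert region r2 else d) d).getD x 0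
          = if x ∈ ks ∧ d.getD x 0 = r1 then r2 else d.getD x 0 := by
  intro ks
  induction ks with
  | nil => intro d _ _; simp
  | cons c t ih =>
    intro d hnd hsub
    simp only [List.nodup_cons] at hnd
    have hck : d.contains c = true :=
      (PySem.Dict.contains_iff_mem_keys d c).mpr (hsub c (by simp))
    set d1 := if d.getD c 0 = r1 then d.insert c r2 else d with hd1
    have hkeys1 : d1.keys = d.keys := by
      rw [hd1]; split_ifs with h
      · exact PySem.Dict.keys_insert_of_contains d r2 hck
      · rfl
    have hd1g : ∀ x : Int × Int, d1.getD x 0 = if x = c ∧ d.getD x 0 = r1 then r2 else d.getD x 0 := by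
      intro x
      rw [hd1]; split_ifs with h1 h2 h3
      · rw [h2.1, PySem.Dict.getD_insert]; simp
      · rw [PySem.Dict.getD_insert]
        by_cases hxc : x = c
        · exact absurd ⟨hxc, hxc ▸ h1⟩ h2
        · simp [hxc]
      · exact absurd (h3.2 ▸ h3.1 ▸ rfl : d.getD c 0 = r1) h1
      · rfl
    have hsub1 : ∀ x ∈ t, x ∈ d1.keys := by
      intro x hx; rw [hkeys1]; exact hsub x (by simp [hx])
    obtain ⟨ihk, ihg⟩ := ih d1 hnd.2 hsub1
    constructor
    · simp only [List.foldl_cons]; rw [ihk, hkeys1]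
    · intro x
      simp only [List.foldl_cons]
      rw [ihg x, hd1g x]
      by_cases hxc : x = c
      · subst hxc
        by_cases hr : d.getD x 0 = r1 <;> simp [hnd.1, hr]
      · simp only [hxc, false_and, if_false, List.mem_cons]
        by_cases hxt : x ∈ t <;> simp [hxt, hxc]

theorem pvMerge_char (d : PySem.Dict (Int × Int) Int) (hnd : d.keys.Nodup) (r1 r2 : Int) :
    (pvMerge d r1 r2).keys = d.keys ∧
    ∀ x : Int × Int,
      (pvMerge d r1 r2).getD x 0 = if x ∈ d.keys ∧ d.getD x 0 = r1 then r2 else d.getD x 0 :=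
  pvMergeFold_char r1 r2 d.keys d hnd (fun _ hx => hx)

def pvInv (K : List (Int × Int)) (d : PySem.Dict (Int × Int) Int)
    (lab : PySem.Dict (Int × Int) (Int × Int))
    (mem : PySem.Dict (Int × Int) (List (Int × Int))) : Prop :=
  d.keys = K ∧ lab.keys = K ∧ mem.keys.Nodup ∧
  ∃ σ : Int → Int × Int,
    (∀ c ∈ K, ∀ dflt, lab.getD c dflt = σ (d.getD c 0)) ∧
    (∀ u v : Int, (∃ x ∈ K, d.getD x 0 = u) → (∃ x ∈ K, d.getD x 0 = v) → σ u = σ v → u = v) ∧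
    (∀ r, r ∈ mem.keys ↔ ∃ x ∈ K, σ (d.getD x 0) = r) ∧
    (∀ x ∈ K, (mem.getD (σ (d.getD x 0)) []).Perm
        (K.filter (fun y => d.getD y 0 == d.getD x 0)))

def pvSig (σ : Int → Int × Int) (r2 q : Int) : Int → Int × Int :=
  fun v => if v = r2 then σ q else σ v

theorem pvUnion_core (K : List (Int × Int)) (hK : K.Nodup)
    (d : PySem.Dict (Int × Int) Int) (lab : PySem.Dict (Int × Int) (Int × Int))
    (mem : PySem.Dict (Int × Int) (List (Int × Int))) (σ : Int → Int × Int)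
    (hdK : d.keys = K) (hlabK : lab.keys = K) (hmemN : mem.keys.Nodup)
    (hσ : ∀ c ∈ K, ∀ dflt, lab.getD c dflt = σ (d.getD c 0))
    (hinj : ∀ u v : Int, (∃ x ∈ K, d.getD x 0 = u) → (∃ x ∈ K, d.getD x 0 = v) → σ u = σ v → u = v)
    (hkeys : ∀ r, r ∈ mem.keys ↔ ∃ x ∈ K, σ (d.getD x 0) = r)
    (hblk : ∀ x ∈ K, (mem.getD (σ (d.getD x 0)) []).Perm
        (K.filter (fun y => d.getD y 0 == d.getD x 0)))
    (r1 r2 p q : Int)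
    (hr1 : ∃ x ∈ K, d.getD x 0 = r1) (hr2 : ∃ x ∈ K, d.getD x 0 = r2)
    (hne : σ r1 ≠ σ r2)
    (hpq : (p = r1 ∧ q = r2) ∨ (p = r2 ∧ q = r1)) :
    pvInv K (pvMerge d r1 r2)
      ((mem.getD (σ p) []).foldl (fun l cc => l.insert cc (σ q)) lab)
      ((mem.insert (σ q) (mem.getD (σ q) [] ++ mem.getD (σ p) [])).erase (σ p)) := by
  have hr12 : r1 ≠ r2 := fun h => hne (h ▸ rfl)
  obtain ⟨cp, hcp, hcpv⟩ : ∃ x ∈ K, d.getD x 0 = p := by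
    rcases hpq with ⟨rfl, -⟩ | ⟨rfl, -⟩ <;> assumption
  obtain ⟨cq, hcq, hcqv⟩ : ∃ x ∈ K, d.getD x 0 = q := by
    rcases hpq with ⟨-, rfl⟩ | ⟨-, rfl⟩ <;> assumption
  have hPQ : σ p ≠ σ q := by
    rcases hpq with ⟨rfl, rfl⟩ | ⟨rfl, rfl⟩
    · exact hne
    · exact hne.symm
  have hpq12 : ∀ v : Int, (v = p ∨ v = q) ↔ (v = r1 ∨ v = r2) := by
    intro v; rcases hpq with ⟨rfl, rfl⟩ | ⟨rfl, rfl⟩ <;> tauto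
  -- cells of the relabelled class
  have hcells : ∀ y, y ∈ mem.getD (σ p) [] ↔ (y ∈ K ∧ d.getD y 0 = p) := by
    have hb := hblk cp hcp
    rw [hcpv] at hb
    intro y
    rw [hb.mem_iff, List.mem_filter]
    simp [hcpv]
  -- the relabel loop on B's label dict
  obtain ⟨hlabK', hlab'g⟩ := pvRelabel_char (σ q) (mem.getD (σ p) []) lab
    (fun y hy => hlabK ▸ ((hcells y).mp hy).1)
  -- A's merge
  have hdnd : d.keys.Nodup := hdK ▸ hK
  obtain ⟨hdK', hd'g⟩ := pvMerge_char d hdnd r1 r2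
  have hdv' : ∀ x ∈ K, (pvMerge d r1 r2).getD x 0
      = if d.getD x 0 = r1 then r2 else d.getD x 0 := by
    intro x hx
    rw [hd'g x, hdK]
    by_cases h : d.getD x 0 = r1 <;> simp [hx, h]
  -- B's members dict
  have hqmem : mem.contains (σ q) = true :=
    (PySem.Dict.contains_iff_mem_keys mem (σ q)).mpr
      ((hkeys (σ q)).mpr ⟨cq, hcq, by rw [hcqv]⟩)
  have hkeys_ins : (mem.insert (σ q) (mem.getD (σ q) [] ++ mem.getD (σ p) [])).keys = mem.keys :=
    PySem.Dict.keys_insert_of_contains mem _ hqmem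
  have hmem'keys : ((mem.insert (σ q) (mem.getD (σ q) [] ++ mem.getD (σ p) [])).erase (σ p)).keys
      = mem.keys.filter (fun y => !(y == σ p)) := by
    rw [pvKeys_erase, hkeys_ins]
  have hmem'mem : ∀ r, r ∈ ((mem.insert (σ q) (mem.getD (σ q) [] ++ mem.getD (σ p) [])).erase (σ p)).keys
      ↔ (r ∈ mem.keys ∧ r ≠ σ p) := by
    intro r; rw [hmem'keys, List.mem_filter]; simp
  have hmem'q : ((mem.insert (σ q) (mem.getD (σ q) [] ++ mem.getD (σ p) [])).erase (σ p)).getD (σ q) []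
      = mem.getD (σ q) [] ++ mem.getD (σ p) [] := by
    rw [pvGetD_erase_of_ne _ _ _ _ (beq_eq_false_iff_ne.mpr hPQ.symm)]
    simp [PySem.Dict.getD_insert]
  have hmem'other : ∀ r, r ≠ σ p → r ≠ σ q →
      ((mem.insert (σ q) (mem.getD (σ q) [] ++ mem.getD (σ p) [])).erase (σ p)).getD r []
        = mem.getD r [] := by
    intro r hrp hrq
    rw [pvGetD_erase_of_ne _ _ _ _ (beq_eq_false_iff_ne.mpr hrp)]
    simp [PySem.Dict.getD_insert, hrq]
  -- blocks of p and q
  have hblkp : (mem.getD (σ p) []).Perm (K.filter (fun y => d.getD y 0 == p)) := by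
    have hb := hblk cp hcp; rw [hcpv] at hb; exact hb
  have hblkq : (mem.getD (σ q) []).Perm (K.filter (fun y => d.getD y 0 == q)) := by
    have hb := hblk cq hcq; rw [hcqv] at hb; exact hb
  refine ⟨hdK' ▸ hdK, hlabK' ▸ hlabK, by rw [hmem'keys]; exact hmemN.filter _,
    pvSig σ r2 q, ?_, ?_, ?_, ?_⟩
  · -- label = σ' ∘ region
    intro c hc dflt
    rw [hlab'g c dflt, hσ c hc dflt, hdv' c hc]
    unfold pvSig
    by_cases h1 : d.getD c 0 = r1
    · have hcm : (c ∈ mem.getD (σ p) []) ↔ r1 = p := by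
        rw [hcells c]; simp [hc, h1]
      rcases hpq with ⟨rfl, rfl⟩ | ⟨rfl, rfl⟩
      · simp [hcm, h1]
      · have hcf : ¬ (c ∈ mem.getD (σ p) []) := by rw [hcm]; exact hr12
        simp [hcf, h1]
    · by_cases h2 : d.getD c 0 = r2
      · have hcm : (c ∈ mem.getD (σ p) []) ↔ r2 = p := by
          rw [hcells c]; simp [hc, h2]
        rcases hpq with ⟨rfl, rfl⟩ | ⟨rfl, rfl⟩
        · have hcf : ¬ (c ∈ mem.getD (σ p) []) := by rw [hcm]; exact hr12.symm
          simp [hcf, h1, h2]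
        · simp [hcm, h1, h2]
      · have hcf : ¬ (c ∈ mem.getD (σ p) []) := by
          rw [hcells c]
          rintro ⟨-, hcv⟩
          rcases hpq with ⟨rfl, -⟩ | ⟨rfl, -⟩
          · exact h1 hcv
          · exact h2 hcv
        simp [hcf, h1, h2]
  · -- injectivity of σ' on the new values
    intro u v hu hv
    unfold pvSig
    have hval : ∀ w : Int, (∃ x ∈ K, (pvMerge d r1 r2).getD x 0 = w) →
        ((∃ x ∈ K, d.getD x 0 = w) ∧ w ≠ r1) := by
      rintro w ⟨x, hx, hw⟩
      rw [hdv' x hx] at hw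
      by_cases h : d.getD x 0 = r1
      · rw [if_pos h] at hw; exact ⟨hw ▸ hr2, hw ▸ hr12.symm⟩
      · rw [if_neg h] at hw; exact ⟨⟨x, hx, hw⟩, hw ▸ h⟩
    obtain ⟨huv, hur1⟩ := hval u hu
    obtain ⟨hvv, hvr1⟩ := hval v hv
    have hqv : ∃ x ∈ K, d.getD x 0 = q := ⟨cq, hcq, hcqv⟩
    by_cases hu2 : u = r2 <;> by_cases hv2 : v = r2
    · simp [hu2, hv2]
    · simp only [hu2, hv2, if_true, if_false, ite_true, ite_false]
      intro h
      have hqveq := hinj q v hqv hvv h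
      rcases hpq with ⟨-, rfl⟩ | ⟨-, rfl⟩
      · exact absurd hqveq.symm hv2
      · exact absurd hqveq.symm hvr1
    · simp only [hu2, hv2, if_true, if_false, ite_true, ite_false]
      intro h
      have hqveq := hinj u q huv hqv h
      rcases hpq with ⟨-, rfl⟩ | ⟨-, rfl⟩
      · exact absurd hqveq hu2
      · exact absurd hqveq hur1
    · simp only [hu2, hv2, if_false, ite_false]
      exact hinj u v huv hvv
  · -- keys of members' = labels in use
    intro r
    rw [hmem'mem r, hkeys r]
    unfold pvSig
    constructor
    · rintro ⟨⟨x, hx, hxr⟩, hrp⟩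
      have hxp : d.getD x 0 ≠ p := fun h => hrp (h ▸ hxr).symm
      by_cases h12 : d.getD x 0 = r1 ∨ d.getD x 0 = r2
      · have hxq : d.getD x 0 = q := by
          rcases (hpq12 (d.getD x 0)).mpr h12 with h | h
          · exact absurd h hxp
          · exact h
        refine ⟨x, hx, ?_⟩
        rw [hdv' x hx]
        rcases h12 with h | h <;> rw [h] <;> simp [hr12, ← hxq, ← h, hxr]
      · push_neg at h12
        refine ⟨x, hx, ?_⟩
        rw [hdv' x hx, if_neg h12.1]
        simp [h12.2, hxr]
    · rintro ⟨x, hx, hxr⟩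
      rw [hdv' x hx] at hxr
      by_cases h1 : d.getD x 0 = r1
      · rw [if_pos h1, if_pos rfl] at hxr
        refine ⟨⟨cq, hcq, by rw [hcqv]; exact hxr⟩, hxr ▸ hPQ.symm⟩
      · rw [if_neg h1] at hxr
        by_cases h2 : d.getD x 0 = r2
        · rw [if_pos h2] at hxr
          refine ⟨⟨cq, hcq, by rw [hcqv]; exact hxr⟩, hxr ▸ hPQ.symm⟩
        · rw [if_neg h2] at hxr
          refine ⟨⟨x, hx, hxr⟩, ?_⟩
          intro h
          have hdp := hinj (d.getD x 0) p ⟨x, hx, rfl⟩ ⟨cp, hcp, hcpv⟩ (hxr ▸ h)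
          rcases (hpq12 (d.getD x 0)).mp (Or.inl hdp) with h' | h'
          · exact h1 h'
          · exact h2 h'
  · -- blocks
    intro x hx
    rw [hdv' x hx]
    by_cases h12 : d.getD x 0 = r1 ∨ d.getD x 0 = r2
    · have hx2 : (if d.getD x 0 = r1 then r2 else d.getD x 0) = r2 := by
        rcases h12 with h | h <;> simp [h, hr12]
      rw [hx2]
      have hsg : pvSig σ r2 q r2 = σ q := by unfold pvSig; simp
      rw [hsg, hmem'q]
      have hfil : (K.filter (fun y => (pvMerge d r1 r2).getD y 0 == r2))
          = K.filter (fun y => (d.getD y 0 == q) || (d.getD y 0 == p)) := by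
        apply List.filter_congr
        intro y hy
        rw [hdv' y hy]
        by_cases h1 : d.getD y 0 = r1 <;> by_cases h2 : d.getD y 0 = r2 <;>
          rcases hpq with ⟨rfl, rfl⟩ | ⟨rfl, rfl⟩ <;>
          simp [h1, h2, hr12, hr12.symm]
      rw [hfil]
      refine (hblkq.append hblkp).trans ?_
      refine ((pvFilter_or_perm (fun y => d.getD y 0 == q) (fun y => d.getD y 0 == p) K ?_).symm)
      rintro y hy ⟨h1, h2⟩
      simp only [beq_iff_eq] at h1 h2
      exact hPQ (congrArg σ (h2.symm.trans h1))
    · push_neg at h12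
      rw [if_neg h12.1]
      have hxnp : d.getD x 0 ≠ p := by
        intro h
        rcases hpq with ⟨rfl, -⟩ | ⟨rfl, -⟩
        · exact h12.1 h
        · exact h12.2 h
      have hxnq : d.getD x 0 ≠ q := by
        intro h
        rcases hpq with ⟨-, rfl⟩ | ⟨-, rfl⟩
        · exact h12.2 h
        · exact h12.1 h
      have hsg : pvSig σ r2 q (d.getD x 0) = σ (d.getD x 0) := by
        unfold pvSig; simp [h12.2]
      rw [hsg]
      have hσnp : σ (d.getD x 0) ≠ σ p :=
        fun h => hxnp (hinj (d.getD x 0) p ⟨x, hx, rfl⟩ ⟨cp, hcp, hcpv⟩ h)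
      have hσnq : σ (d.getD x 0) ≠ σ q :=
        fun h => hxnq (hinj (d.getD x 0) q ⟨x, hx, rfl⟩ ⟨cq, hcq, hcqv⟩ h)
      rw [hmem'other _ hσnp hσnq]
      refine (hblk x hx).trans ?_
      apply List.Perm.of_eq
      apply List.filter_congr
      intro y hy
      rw [hdv' y hy]
      by_cases h1 : d.getD y 0 = r1
      · simp [h1, beq_iff_eq, Ne.symm h12.2, Ne.symm h12.1]
      · simp [h1]

theorem pvInv_congr_d (K : List (Int × Int)) (d d' : PySem.Dict (Int × Int) Int)
    (lab : PySem.Dict (Int × Int) (Int × Int)) (mem : PySem.Dict (Int × Int) (List (Int × Int)))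
    (hg : ∀ x, d'.getD x 0 = d.getD x 0) (hk : d'.keys = d.keys) :
    pvInv K d lab mem → pvInv K d' lab mem := by
  rintro ⟨hdK, hlabK, hmemN, σ, hσ, hinj, hkeys, hblk⟩
  refine ⟨hk ▸ hdK, hlabK, hmemN, σ, ?_, ?_, ?_, ?_⟩
  · intro c hc dflt; rw [hg c]; exact hσ c hc dflt
  · intro u v hu hv
    simp only [hg] at hu hv
    exact hinj u v hu hv
  · intro r
    simp only [hg]
    exact hkeys r
  · intro x hx
    simp only [hg]
    exact hblk x hx

theorem pvUnion_step (K : List (Int × Int)) (hK : K.Nodup)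
    (d : PySem.Dict (Int × Int) Int) (lab : PySem.Dict (Int × Int) (Int × Int))
    (mem : PySem.Dict (Int × Int) (List (Int × Int))) (c : Int × Int) (hc : c ∈ K)
    (nb : Int × Int) (hInv : pvInv K d lab mem) :
    pvInv K (if d.contains nb then pvMerge d (d.getD nb 0) (d.getD c 0) else d)
      (pvUnion (lab, mem) c nb).1 (pvUnion (lab, mem) c nb).2 := by
  obtain ⟨hdK, hlabK, hmemN, σ, hσ, hinj, hkeys, hblk⟩ := hInv
  by_cases hnb : nb ∈ K
  · have hcond : d.contains nb = true := (PySem.Dict.contains_iff_mem_keys d nb).mpr (hdK ▸ hnb)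
    have hcondl : lab.contains nb = true :=
      (PySem.Dict.contains_iff_mem_keys lab nb).mpr (hlabK ▸ hnb)
    have ha : lab.getD nb nb = σ (d.getD nb 0) := hσ nb hnb nb
    have hb : lab.getD c c = σ (d.getD c 0) := hσ c hc c
    rw [if_pos hcond]
    unfold pvUnion
    simp only [hcondl, if_true, ha, hb]
    by_cases heq : σ (d.getD nb 0) = σ (d.getD c 0)
    · simp only [heq, ne_eq, not_true_eq_false, if_false]
      have hreq : d.getD nb 0 = d.getD c 0 :=
        hinj _ _ ⟨nb, hnb, rfl⟩ ⟨c, hc, rfl⟩ heq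
      have hdnd : d.keys.Nodup := hdK ▸ hK
      obtain ⟨hk', hg'⟩ := pvMerge_char d hdnd (d.getD nb 0) (d.getD c 0)
      refine pvInv_congr_d K d _ lab mem ?_ hk' ⟨hdK, hlabK, hmemN, σ, hσ, hinj, hkeys, hblk⟩
      intro x
      rw [hg' x]
      by_cases hxx : x ∈ d.keys ∧ d.getD x 0 = d.getD nb 0
      · rw [if_pos hxx, ← hreq, hxx.2]
      · rw [if_neg hxx]
    · simp only [ne_eq, heq, not_false_eq_true, if_true]
      have hr1 : ∃ x ∈ K, d.getD x 0 = d.getD nb 0 := ⟨nb, hnb, rfl⟩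
      have hr2 : ∃ x ∈ K, d.getD x 0 = d.getD c 0 := ⟨c, hc, rfl⟩
      split_ifs with hlen
      · simp only []
        exact pvUnion_core K hK d lab mem σ hdK hlabK hmemN hσ hinj hkeys hblk
          (d.getD nb 0) (d.getD c 0) (d.getD c 0) (d.getD nb 0) hr1 hr2 heq (Or.inr ⟨rfl, rfl⟩)
      · simp only []
        exact pvUnion_core K hK d lab mem σ hdK hlabK hmemN hσ hinj hkeys hblk
          (d.getD nb 0) (d.getD c 0) (d.getD nb 0) (d.getD c 0) hr1 hr2 heq (Or.inl ⟨rfl, rfl⟩)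
  · have hcond : d.contains nb = false := by
      rw [← Bool.not_eq_true, PySem.Dict.contains_iff_mem_keys d nb, hdK]; exact hnb
    have hcondl : lab.contains nb = false := by
      rw [← Bool.not_eq_true, PySem.Dict.contains_iff_mem_keys lab nb, hlabK]; exact hnb
    rw [if_neg (by simp [hcond])]
    unfold pvUnion
    simp only [hcondl, if_false, Bool.false_eq_true]
    exact ⟨hdK, hlabK, hmemN, σ, hσ, hinj, hkeys, hblk⟩

theorem pvLoop_inv (K : List (Int × Int)) (hK : K.Nodup) :
    ∀ (l : List (Int × Int)), (∀ x ∈ l, x ∈ K) →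
    ∀ (d : PySem.Dict (Int × Int) Int) (lab : PySem.Dict (Int × Int) (Int × Int))
      (mem : PySem.Dict (Int × Int) (List (Int × Int))), pvInv K d lab mem →
      pvInv K
        (l.foldl (fun d c =>
          let d1 := if d.contains (c.1 - 1, c.2) then pvMerge d (d.getD (c.1 - 1, c.2) 0) (d.getD c 0) else d
          if d1.contains (c.1, c.2 - 1) then pvMerge d1 (d1.getD (c.1, c.2 - 1) 0) (d1.getD c 0) else d1) d)
        ((l.foldl (fun s c => [(c.1 - 1, c.2), (c.1, c.2 - 1)].foldl (fun s nb => pvUnion s c nb) s) (lab, mem)).1)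
        ((l.foldl (fun s c => [(c.1 - 1, c.2), (c.1, c.2 - 1)].foldl (fun s nb => pvUnion s c nb) s) (lab, mem)).2) := by
  intro l
  induction l with
  | nil => intro _ d lab mem h; simpa using h
  | cons c t ih =>
    intro hsub d lab mem hInv
    have hc : c ∈ K := hsub c (by simp)
    have h1 := pvUnion_step K hK d lab mem c hc (c.1 - 1, c.2) hInv
    have h2 := pvUnion_step K hK _ _ _ c hc (c.1, c.2 - 1) h1
    simp only [List.foldl_cons]
    rw [Prod.mk.eta] at h2
    exact ih (fun x hx => hsub x (by simp [hx])) _ _ _ h2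

def pvPB (hd : PySem.Dict (Int × Int) Int) (c : Int × Int) : Bool := !(hd.getD c 0 == 9)

def pvK (hd : PySem.Dict (Int × Int) Int) : List (Int × Int) := hd.keys.filter (pvPB hd)

theorem pvInit_inv (hd : PySem.Dict (Int × Int) Int) (hnd : hd.keys.Nodup) :
    ((PySem.List.enumerate hd.keys).foldl
        (fun d p => if hd.getD p.2 0 ≠ 9 then d.insert p.2 p.1 else d) PySem.Dict.empty).keys
      = pvK hd ∧
    (hd.keys.foldl
        (fun (s : PySem.Dict (Int × Int) (Int × Int) × PySem.Dict (Int × Int) (List (Int × Int))) cell =>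
          if hd.getD cell 0 ≠ 9 then (s.1.insert cell cell, s.2.insert cell [cell]) else s)
        (PySem.Dict.empty, PySem.Dict.empty)).1.keys = pvK hd ∧
    pvInv (pvK hd)
      ((PySem.List.enumerate hd.keys).foldl
        (fun d p => if hd.getD p.2 0 ≠ 9 then d.insert p.2 p.1 else d) PySem.Dict.empty)
      ((hd.keys.foldl
        (fun (s : PySem.Dict (Int × Int) (Int × Int) × PySem.Dict (Int × Int) (List (Int × Int))) cell =>
          if hd.getD cell 0 ≠ 9 then (s.1.insert cell cell, s.2.insert cell [cell]) else s)
        (PySem.Dict.empty, PySem.Dict.empty)).1)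
      ((hd.keys.foldl
        (fun (s : PySem.Dict (Int × Int) (Int × Int) × PySem.Dict (Int × Int) (List (Int × Int))) cell =>
          if hd.getD cell 0 ≠ 9 then (s.1.insert cell cell, s.2.insert cell [cell]) else s)
        (PySem.Dict.empty, PySem.Dict.empty)).2) := by
  -- decide (≠ 9) agrees with pvPB
  have hdec : ∀ c : Int × Int, decide (hd.getD c 0 ≠ 9) = pvPB hd c := by
    intro c; by_cases h : hd.getD c 0 = 9 <;> simp [pvPB, h]
  have hKnd : (pvK hd).Nodup := hnd.filter _
  -- ===== A's initial dict =====
  set F := (PySem.List.enumerate hd.keys 0).filter (fun p => pvPB hd p.2) with hF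
  have hFsnd : F.map (fun p => p.2) = pvK hd := pvEnumFilterMap (pvPB hd) hd.keys 0
  have hAeq : ((PySem.List.enumerate hd.keys).foldl
      (fun d p => if hd.getD p.2 0 ≠ 9 then d.insert p.2 p.1 else d) PySem.Dict.empty)
      = F.foldl (fun d p => d.insert p.2 p.1) PySem.Dict.empty := by
    rw [pvFoldlIte (fun p : Int × Int × Int => hd.getD p.2 0 ≠ 9)
      (fun d p => d.insert p.2 p.1) (PySem.List.enumerate hd.keys 0) PySem.Dict.empty]
    congr 1
    apply List.filter_congr
    intro p _
    exact hdec p.2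
  -- items of A's initial dict
  have hAitems : (F.foldl (fun d p => d.insert p.2 p.1) PySem.Dict.empty).items
      = F.map (fun p => (p.2, p.1)) := by
    have hfr := PySem.Dict.items_foldl_insert_fresh F (fun p => p.2) (fun p => p.1)
      PySem.Dict.empty (fun a _ => rfl) (by rw [hFsnd]; exact hKnd)
    simpa using hfr
  have hAkeys : ((PySem.List.enumerate hd.keys).foldl
      (fun d p => if hd.getD p.2 0 ≠ 9 then d.insert p.2 p.1 else d) PySem.Dict.empty).keys
      = pvK hd := by
    rw [hAeq]
    show ((F.foldl (fun d p => d.insert p.2 p.1) PySem.Dict.empty).items.map (fun x => x.1)) = pvK hd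
    rw [hAitems, List.map_map]
    exact hFsnd
  have hFfstnd : (F.map (fun p => p.1)).Nodup := by
    have hpw := (PySem.List.pairwise_lt_enumerate hd.keys 0).filter
      (fun p => pvPB hd p.2)
    exact ((List.pairwise_map).mpr hpw).imp (fun h => ne_of_lt h)
  -- value lookup and sigma0
  set σ0 : Int → Int × Int :=
    fun v => ((F.find? (fun p => p.1 == v)).map (fun p => p.2)).getD (0, 0) with hσ0
  have hAget : ∀ c ∈ pvK hd,
      ((PySem.List.enumerate hd.keys).foldl
        (fun d p => if hd.getD p.2 0 ≠ 9 then d.insert p.2 p.1 else d) PySem.Dict.empty).get? c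
        = (F.find? (fun p => p.2 == c)).map (fun p => p.1) := by
    intro c _
    rw [hAeq]
    show ((F.foldl (fun d p => d.insert p.2 p.1) PySem.Dict.empty).items.find?
        (fun p => p.1 == c)).map (fun x => x.2)
      = (F.find? (fun p => p.2 == c)).map (fun p => p.1)
    rw [hAitems, List.find?_map]
    rw [Option.map_map]
    rfl
  have hAfact : ∀ c ∈ pvK hd, ∃ vc : Int,
      ((PySem.List.enumerate hd.keys).foldl
        (fun d p => if hd.getD p.2 0 ≠ 9 then d.insert p.2 p.1 else d) PySem.Dict.empty).get? c
        = some vc ∧ σ0 vc = c := by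
    intro c hc
    have hcF : c ∈ F.map (fun p => p.2) := by rw [hFsnd]; exact hc
    obtain ⟨pc, hpcF, hpc2⟩ := List.mem_map.mp hcF
    refine ⟨pc.1, ?_, ?_⟩
    · rw [hAget c hc]
      have : F.find? (fun p => p.2 == c) = some pc := by
        rw [← hpc2]
        exact pvFind?_proj (fun p => p.2) F pc (by rw [hFsnd]; exact hKnd) hpcF
      rw [this]; rfl
    · rw [hσ0]
      have : F.find? (fun p => p.1 == pc.1) = some pc :=
        pvFind?_proj (fun p => p.1) F pc hFfstnd hpcF
      simp [this, hpc2]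
  -- B's initial state, split into two independent folds
  have hBsplit : (hd.keys.foldl
      (fun (s : PySem.Dict (Int × Int) (Int × Int) × PySem.Dict (Int × Int) (List (Int × Int))) cell =>
        if hd.getD cell 0 ≠ 9 then (s.1.insert cell cell, s.2.insert cell [cell]) else s)
      (PySem.Dict.empty, PySem.Dict.empty))
      = (hd.keys.foldl (fun d cell => if hd.getD cell 0 ≠ 9 then d.insert cell cell else d) PySem.Dict.empty,
         hd.keys.foldl (fun d cell => if hd.getD cell 0 ≠ 9 then d.insert cell [cell] else d) PySem.Dict.empty) := by
    rw [show (fun (s : PySem.Dict (Int × Int) (Int × Int) × PySem.Dict (Int × Int) (List (Int × Int))) cell =>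
        if hd.getD cell 0 ≠ 9 then (s.1.insert cell cell, s.2.insert cell [cell]) else s)
      = (fun (s : PySem.Dict (Int × Int) (Int × Int) × PySem.Dict (Int × Int) (List (Int × Int))) cell =>
        ((fun d cell => if hd.getD cell 0 ≠ 9 then PySem.Dict.insert d cell cell else d) s.1 cell,
         (fun d cell => if hd.getD cell 0 ≠ 9 then PySem.Dict.insert d cell [cell] else d) s.2 cell)) from
      funext fun s => funext fun cell => by by_cases h : hd.getD cell 0 ≠ 9 <;> simp [h]]
    exact PySem.List.foldl_prod_mk
      (f := fun d cell => if hd.getD cell 0 ≠ 9 then PySem.Dict.insert d cell cell else d)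
      (g := fun d cell => if hd.getD cell 0 ≠ 9 then PySem.Dict.insert d cell [cell] else d)
      hd.keys PySem.Dict.empty PySem.Dict.empty
  have hlab0items : (hd.keys.foldl
      (fun d cell => if hd.getD cell 0 ≠ 9 then d.insert cell cell else d) PySem.Dict.empty).items
      = (pvK hd).map (fun c => (c, c)) := by
    rw [pvFoldlIte (fun cell : Int × Int => hd.getD cell 0 ≠ 9)
      (fun d cell => d.insert cell cell) hd.keys PySem.Dict.empty]
    rw [List.filter_congr (fun c _ => hdec c)]
    have hfr := PySem.Dict.items_foldl_insert_fresh (pvK hd) (fun c => c) (fun c => c)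
      PySem.Dict.empty (fun a _ => rfl) (by simpa using hKnd)
    simpa using hfr
  have hmem0items : (hd.keys.foldl
      (fun d cell => if hd.getD cell 0 ≠ 9 then d.insert cell [cell] else d) PySem.Dict.empty).items
      = (pvK hd).map (fun c => (c, [c])) := by
    rw [pvFoldlIte (fun cell : Int × Int => hd.getD cell 0 ≠ 9)
      (fun d cell => d.insert cell [cell]) hd.keys PySem.Dict.empty]
    rw [List.filter_congr (fun c _ => hdec c)]
    have hfr := PySem.Dict.items_foldl_insert_fresh (pvK hd) (fun c => c) (fun c => [c])
      PySem.Dict.empty (fun a _ => rfl) (by simpa using hKnd)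
    simpa using hfr
  have hlab0keys : (hd.keys.foldl
      (fun d cell => if hd.getD cell 0 ≠ 9 then d.insert cell cell else d) PySem.Dict.empty).keys
      = pvK hd := by
    show ((hd.keys.foldl
      (fun d cell => if hd.getD cell 0 ≠ 9 then d.insert cell cell else d) PySem.Dict.empty).items.map
        (fun x => x.1)) = pvK hd
    rw [hlab0items, List.map_map]
    rw [show ((fun x : (Int × Int) × (Int × Int) => x.1) ∘ fun c => (c, c)) = id from rfl, List.map_id]
  have hmem0keys : (hd.keys.foldl
      (fun d cell => if hd.getD cell 0 ≠ 9 then d.insert cell [cell] else d) PySem.Dict.empty).keys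
      = pvK hd := by
    show ((hd.keys.foldl
      (fun d cell => if hd.getD cell 0 ≠ 9 then d.insert cell [cell] else d) PySem.Dict.empty).items.map
        (fun x => x.1)) = pvK hd
    rw [hmem0items, List.map_map]
    rw [show ((fun x : (Int × Int) × List (Int × Int) => x.1) ∘ fun c => (c, [c])) = id from rfl, List.map_id]
  have hlab0get : ∀ c ∈ pvK hd, ∀ dflt, (hd.keys.foldl
      (fun d cell => if hd.getD cell 0 ≠ 9 then d.insert cell cell else d) PySem.Dict.empty).getD c dflt
      = c := by
    intro c hc dflt
    show (((hd.keys.foldl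
      (fun d cell => if hd.getD cell 0 ≠ 9 then d.insert cell cell else d) PySem.Dict.empty).items.find?
        (fun p => p.1 == c)).map (fun x => x.2)).getD dflt = c
    rw [hlab0items, List.find?_map]
    have : (pvK hd).find? (fun y => y == c) = some c := by
      have := pvFind?_proj (fun y => y) (pvK hd) c (by simpa using hKnd) hc
      simpa using this
    rw [show ((fun p : (Int × Int) × (Int × Int) => p.1 == c) ∘ fun c => (c, c)) = (fun y => y == c) from rfl]
    rw [this]
    rfl
  have hmem0get : ∀ c ∈ pvK hd, (hd.keys.foldl
      (fun d cell => if hd.getD cell 0 ≠ 9 then d.insert cell [cell] else d) PySem.Dict.empty).getD c []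
      = [c] := by
    intro c hc
    show (((hd.keys.foldl
      (fun d cell => if hd.getD cell 0 ≠ 9 then d.insert cell [cell] else d) PySem.Dict.empty).items.find?
        (fun p => p.1 == c)).map (fun x => x.2)).getD [] = [c]
    rw [hmem0items, List.find?_map]
    have : (pvK hd).find? (fun y => y == c) = some c := by
      have := pvFind?_proj (fun y => y) (pvK hd) c (by simpa using hKnd) hc
      simpa using this
    rw [show ((fun p : (Int × Int) × List (Int × Int) => p.1 == c) ∘ fun c => (c, [c])) = (fun y => y == c) from rfl]
    rw [this]
    rfl
  -- getD value of A's dict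
  have hAgetD : ∀ c ∈ pvK hd, σ0 (((PySem.List.enumerate hd.keys).foldl
      (fun d p => if hd.getD p.2 0 ≠ 9 then d.insert p.2 p.1 else d) PySem.Dict.empty).getD c 0) = c := by
    intro c hc
    obtain ⟨vc, hvc, hσvc⟩ := hAfact c hc
    show σ0 ((((PySem.List.enumerate hd.keys).foldl
      (fun d p => if hd.getD p.2 0 ≠ 9 then d.insert p.2 p.1 else d) PySem.Dict.empty).get? c).getD 0) = c
    rw [hvc]
    exact hσvc
  have hAinj : ∀ x ∈ pvK hd, ∀ y ∈ pvK hd,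
      ((PySem.List.enumerate hd.keys).foldl
        (fun d p => if hd.getD p.2 0 ≠ 9 then d.insert p.2 p.1 else d) PySem.Dict.empty).getD x 0
      = ((PySem.List.enumerate hd.keys).foldl
        (fun d p => if hd.getD p.2 0 ≠ 9 then d.insert p.2 p.1 else d) PySem.Dict.empty).getD y 0
      → x = y := by
    intro x hx y hy h
    have := congrArg σ0 h
    rw [hAgetD x hx, hAgetD y hy] at this
    exact this
  refine ⟨hAkeys, ?_, ?_⟩
  · rw [hBsplit]; exact hlab0keys
  · refine ⟨hAkeys, by rw [hBsplit]; exact hlab0keys,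
      by rw [hBsplit]; show (hd.keys.foldl _ PySem.Dict.empty).keys.Nodup; rw [hmem0keys]; exact hKnd,
      σ0, ?_, ?_, ?_, ?_⟩
    · intro c hc dflt
      rw [hBsplit]
      show (hd.keys.foldl
        (fun d cell => if hd.getD cell 0 ≠ 9 then d.insert cell cell else d) PySem.Dict.empty).getD c dflt = _
      rw [hlab0get c hc dflt, hAgetD c hc]
    · rintro u v ⟨x, hx, rfl⟩ ⟨y, hy, rfl⟩ h
      have h1 := hAgetD x hx
      have h2 := hAgetD y hy
      rw [h1, h2] at h
      rw [h]
    · intro r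
      rw [hBsplit]
      show r ∈ (hd.keys.foldl
        (fun d cell => if hd.getD cell 0 ≠ 9 then d.insert cell [cell] else d) PySem.Dict.empty).keys ↔ _
      rw [hmem0keys]
      constructor
      · intro hr; exact ⟨r, hr, hAgetD r hr⟩
      · rintro ⟨x, hx, hxr⟩
        rw [hAgetD x hx] at hxr
        exact hxr ▸ hx
    · intro x hx
      rw [hBsplit]
      show ((hd.keys.foldl
        (fun d cell => if hd.getD cell 0 ≠ 9 then d.insert cell [cell] else d)
          PySem.Dict.empty).getD (σ0 _) []).Perm _
      rw [hAgetD x hx, hmem0get x hx]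
      have : (pvK hd).filter (fun y =>
          ((PySem.List.enumerate hd.keys).foldl
            (fun d p => if hd.getD p.2 0 ≠ 9 then d.insert p.2 p.1 else d) PySem.Dict.empty).getD y 0
          == ((PySem.List.enumerate hd.keys).foldl
            (fun d p => if hd.getD p.2 0 ≠ 9 then d.insert p.2 p.1 else d) PySem.Dict.empty).getD x 0)
          = [x] := by
        apply pvFilter_singleton _ _ _ hKnd hx
        intro y hy
        simp only [beq_iff_eq]
        constructor
        · exact hAinj y hy x hx
        · rintro rfl; rfl
      rw [this]

theorem pvFinal (K : List (Int × Int)) (hK : K.Nodup)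
    (d : PySem.Dict (Int × Int) Int) (lab : PySem.Dict (Int × Int) (Int × Int))
    (mem : PySem.Dict (Int × Int) (List (Int × Int))) (hInv : pvInv K d lab mem) :
    PySem.List.sorted (mem.values.map (fun m => (m.length : Int))) (fun x => x) true
      = (PySem.List.sorted (PySem.Dict.counter d.values).items (fun p => p.2) true).map
          (fun p => p.2) := by
  obtain ⟨hdK, hlabK, hmemN, σ, hσ, hinj, hkeys, hblk⟩ := hInv
  have hdnd : d.keys.Nodup := hdK ▸ hK
  have hvals : d.values = K.map (fun c => d.getD c 0) := by
    rw [← hdK]; exact PySem.Dict.values_eq_map_keys d hdnd 0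
  set csA : List Int :=
    (PySem.Set.ofList d.values).map (fun v => (d.values.count v : Int)) with hcsA
  -- membership of values
  have hmemvals : ∀ v : Int, v ∈ d.values ↔ ∃ x ∈ K, d.getD x 0 = v := by
    intro v
    rw [hvals, List.mem_map]
  -- ===== A's side: SA = sorted csA =====
  have hitems : (PySem.Dict.counter d.values).items
      = (PySem.Set.ofList d.values).map (fun k => (k, (d.values.count k : Int))) :=
    PySem.Dict.items_counter d.values
  have hSAperm : ((PySem.List.sorted (PySem.Dict.counter d.values).items (fun p => p.2) true).map
      (fun p => p.2)).Perm csA := by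
    have h1 := (PySem.List.sorted_perm (PySem.Dict.counter d.values).items (fun p => p.2) true).map
      (fun p : Int × Int => p.2)
    have he : (PySem.Dict.counter d.values).items.map (fun p : Int × Int => p.2) = csA := by
      rw [hitems, List.map_map]; rfl
    exact he ▸ h1
  have hSApw : ((PySem.List.sorted (PySem.Dict.counter d.values).items (fun p => p.2) true).map
      (fun p => p.2)).Pairwise (fun a b : Int => b ≤ a) := by
    have := PySem.List.sorted_pairwise_rev (PySem.Dict.counter d.values).items (fun p => p.2)
    exact this.map (fun p : Int × Int => p.2) (fun a b h => h)
  -- ===== B's side: sizes list is a permutation of csA =====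
  have hbsz : mem.values.map (fun m => (m.length : Int))
      = mem.keys.map (fun k => ((mem.getD k []).length : Int)) := by
    rw [PySem.Dict.values_eq_map_keys mem hmemN [], List.map_map]
    rfl
  have hkeysperm : mem.keys.Perm ((PySem.Set.ofList d.values).map σ) := by
    rw [List.perm_ext_iff_of_nodup hmemN]
    · intro r
      rw [hkeys r, List.mem_map]
      constructor
      · rintro ⟨x, hx, rfl⟩
        exact ⟨d.getD x 0, (PySem.Set.mem_ofList _ _).mpr ((hmemvals _).mpr ⟨x, hx, rfl⟩), rfl⟩
      · rintro ⟨v, hv, rfl⟩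
        obtain ⟨x, hx, rfl⟩ := (hmemvals v).mp ((PySem.Set.mem_ofList _ _).mp hv)
        exact ⟨x, hx, rfl⟩
    · refine List.Nodup.map_on ?_ (PySem.Set.nodup_ofList d.values)
      intro u hu v hv h
      exact hinj u v ((hmemvals u).mp ((PySem.Set.mem_ofList _ _).mp hu))
        ((hmemvals v).mp ((PySem.Set.mem_ofList _ _).mp hv)) h
  have hblock_len : ∀ v ∈ PySem.Set.ofList d.values,
      ((mem.getD (σ v) []).length : Int) = (d.values.count v : Int) := by
    intro v hv
    obtain ⟨x, hx, hxv⟩ := (hmemvals v).mp ((PySem.Set.mem_ofList _ _).mp hv)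
    have hb := hblk x hx
    rw [hxv] at hb
    rw [hb.length_eq]
    congr 1
    rw [hvals, List.count_eq_countP, List.countP_map, List.countP_eq_length_filter]
    rfl
  have hbszperm : (mem.values.map (fun m => (m.length : Int))).Perm csA := by
    rw [hbsz]
    refine (hkeysperm.map (fun k => ((mem.getD k []).length : Int))).trans ?_
    rw [List.map_map, hcsA]
    exact List.Perm.of_eq (List.map_congr_left (fun v hv => hblock_len v hv))
  -- ===== both are the descending sort of csA =====
  refine List.Perm.eq_of_pairwise (le := fun a b : Int => b ≤ a)
    (fun a b _ _ h1 h2 => by omega) ?_ ?_ ?_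
  · have := PySem.List.sorted_pairwise_rev (mem.values.map (fun m => (m.length : Int)))
      (fun x : Int => x)
    exact this
  · exact hSApw
  · exact ((PySem.List.sorted_perm _ _ _).trans hbszperm).trans hSAperm.symm


theorem pvLoop_inv2 (K : List (Int × Int)) (hK : K.Nodup)
    (l l' : List (Int × Int)) (hll : l' = l) (hsub : ∀ x ∈ l, x ∈ K)
    (d : PySem.Dict (Int × Int) Int) (lab : PySem.Dict (Int × Int) (Int × Int))
    (mem : PySem.Dict (Int × Int) (List (Int × Int))) (hInv : pvInv K d lab mem) :
      pvInv K
        (l.foldl (fun d c =>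
          let d1 := if d.contains (c.1 - 1, c.2) then pvMerge d (d.getD (c.1 - 1, c.2) 0) (d.getD c 0) else d
          if d1.contains (c.1, c.2 - 1) then pvMerge d1 (d1.getD (c.1, c.2 - 1) 0) (d1.getD c 0) else d1) d)
        ((l'.foldl (fun s c => [(c.1 - 1, c.2), (c.1, c.2 - 1)].foldl (fun s nb => pvUnion s c nb) s) (lab, mem)).1)
        ((l'.foldl (fun s c => [(c.1 - 1, c.2), (c.1, c.2 - 1)].foldl (fun s nb => pvUnion s c nb) s) (lab, mem)).2) := by
  subst hll
  exact pvLoop_inv K hK l' hsub d lab mem hInv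

-- ---- indexing into the common sorted size list ----

theorem pvGet_take3 (X : List Int) (i : Int) (h0 : 0 ≤ i) (h3 : i < 3) :
    PySem.List.pyGet? (X.take 3) i = PySem.List.pyGet? X i := by
  lift i to Nat using h0 with n
  rw [PySem.List.pyGet?_natCast, PySem.List.pyGet?_natCast, List.getElem?_take, if_pos]
  exact_mod_cast h3

theorem pvTail_eq (dF : PySem.Dict (Int × Int) Int)
    (memF : PySem.Dict (Int × Int) (List (Int × Int)))
    (h : PySem.List.sorted (memF.values.map (fun m => (m.length : Int))) (fun x => x) true
      = (PySem.List.sorted (PySem.Dict.counter dF.values).items (fun p => p.2) true).map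
          (fun p => p.2)) :
    ((PySem.List.pyGet? ((PySem.List.slice
        (PySem.List.sorted (PySem.Dict.counter dF.values).items (fun p => p.2) true)
        none (some 3)).map (fun p => p.2)) 0).getD 0) *
      ((PySem.List.pyGet? ((PySem.List.slice
        (PySem.List.sorted (PySem.Dict.counter dF.values).items (fun p => p.2) true)
        none (some 3)).map (fun p => p.2)) 1).getD 0) *
      ((PySem.List.pyGet? ((PySem.List.slice
        (PySem.List.sorted (PySem.Dict.counter dF.values).items (fun p => p.2) true)
        none (some 3)).map (fun p => p.2)) 2).getD 0)
    = ((PySem.List.pyGet? (PySem.List.sorted (memF.values.map (fun m => (m.length : Int)))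
          (fun x => x) true) 0).getD 0) *
      ((PySem.List.pyGet? (PySem.List.sorted (memF.values.map (fun m => (m.length : Int)))
          (fun x => x) true) 1).getD 0) *
      ((PySem.List.pyGet? (PySem.List.sorted (memF.values.map (fun m => (m.length : Int)))
          (fun x => x) true) 2).getD 0) := by
  rw [h]
  rw [PySem.List.slice_to
    (xs := PySem.List.sorted (PySem.Dict.counter dF.values).items (fun p => p.2) true)
    (b := 3) (by norm_num)]
  rw [show ((3:Int)).toNat = 3 from rfl]
  rw [List.map_take]
  rw [pvGet_take3 _ 0 (by norm_num) (by norm_num), pvGet_take3 _ 1 (by norm_num) (by norm_num),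
    pvGet_take3 _ 2 (by norm_num) (by norm_num)]

-- ===== VERDICT (by name: the statement is the Claim_ definition above) =====
theorem calculate_largest_basins_spec : Claim_equal_calculate_largest_basins := by
  intro heights _ _
  show calculate_largest_basins heights = calculate_largest_basins_alt heights
  have hnd : (pvHeightsDict heights).keys.Nodup := PySem.Dict.nodup_keys_ofList _
  have hKnd : (pvK (pvHeightsDict heights)).Nodup := hnd.filter _
  obtain ⟨hAkeys, hBkeys, hInv0⟩ := pvInit_inv (pvHeightsDict heights) hnd
  have hInvF := pvLoop_inv2 (pvK (pvHeightsDict heights)) hKnd _ _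
    (hBkeys.trans hAkeys.symm) (fun x hx => by rw [hAkeys] at hx; exact hx) _ _ _ hInv0
  rw [Prod.mk.eta] at hInvF
  have hEq := pvFinal _ hKnd _ _ _ hInvF
  exact pvTail_eq _ _ hEq
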